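-- pv_equiv track=rewrite | github.com/M0VENTURA/sptnr | popularity.py | is_live_or_alternate_album
-- ===== SOURCE A (Python) =====
-- def is_live_or_alternate_album(album: str) -> bool:
--     """
--     Determine if an album is a live, unplugged, or acoustic album.
--
--     This helps identify albums where the recorded versions differ from studio versions,
--     such as "Alice in Chains - Unplugged in New York" where tracks should not be matched
--     with their studio counterparts.
--
--     Args:
--         album: Album name to check
--
--     Returns:
--         True if this is a live/unplugged/acoustic album, False otherwise
--     """
--     if not album:
--         return False
--
--     album_lower = album.lower()
--
--     # Live album indicators
--     # Note: 'unplugged' covers 'mtv unplugged', so no need for separate entry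
--     live_keywords = [
--         'live',
--         'unplugged',
--         'acoustic',
--         'live at',
--         'live in',
--         'concert',
--         'live from',
--         'in concert',
--         'on stage',
--         'live tour'  # More specific than just 'tour' to avoid false positives
--     ]
--
--     return any(keyword in album_lower for keyword in live_keywords)
-- ===== SOURCE B (Python) =====
-- def is_live_or_alternate_album(album: str) -> bool:
--     if not album:
--         return False
--     s = album.lower()
--     # 'live at/in/from/tour' all contain 'live', 'in concert' contains 'concert',
--     # so this reduced set matches exactly the same strings as the original list.
--     keywords = ('live', 'unplugged', 'acoustic', 'concert', 'on stage')
--     # single left-to-right scan over positions instead of one substring search per keyword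
--     return any(s.startswith(keywords, i) for i in range(len(s)))
-- ===== Notes on version B (the rewrite author's own statement) =====
-- stated objective: alternative
-- what changed: Replaces the per-keyword substring membership tests with a single left-to-right scan over string positions testing startswith against a reduced (provably equivalent) 5-keyword set.
import Mathlib
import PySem

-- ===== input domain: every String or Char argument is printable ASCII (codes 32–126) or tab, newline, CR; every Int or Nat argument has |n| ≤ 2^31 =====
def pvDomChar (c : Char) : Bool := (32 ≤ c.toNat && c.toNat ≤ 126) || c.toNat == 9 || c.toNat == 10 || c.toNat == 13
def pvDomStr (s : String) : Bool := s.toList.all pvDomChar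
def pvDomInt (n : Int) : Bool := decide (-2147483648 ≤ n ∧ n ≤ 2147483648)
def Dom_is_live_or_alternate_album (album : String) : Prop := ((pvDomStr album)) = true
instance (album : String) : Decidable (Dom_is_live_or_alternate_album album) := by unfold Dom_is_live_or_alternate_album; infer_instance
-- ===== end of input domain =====

-- B replaces the per-keyword substring searches with a single positional scan using a
-- reduced, provably equivalent 5-keyword set (alternative decomposition, same cost).


-- ===== PORT A =====
def liveKeywordsA : List String :=
  ["live", "unplugged", "acoustic", "live at", "live in", "concert",
   "live from", "in concert", "on stage", "live tour"]

def is_live_or_alternate_album (album : String) : Bool :=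
  if album == "" then false
  else
    let album_lower := PySem.Str.lower album
    liveKeywordsA.any (fun kw => PySem.Str.isIn kw album_lower)

-- ===== PORT B =====
def liveKeywordsB : List String :=
  ["live", "unplugged", "acoustic", "concert", "on stage"]

-- s.startswith(keywords, i): does some keyword start at this position (suffix)?
def startsAnyB (cs : List Char) : Bool :=
  liveKeywordsB.any (fun kw => kw.toList.isPrefixOf cs)

-- the positional scan: any(s.startswith(keywords, i) for i in range(len(s)))
def scanB : List Char → Bool
  | [] => false
  | c :: rest => startsAnyB (c :: rest) || scanB rest

def is_live_or_alternate_album_alt (album : String) : Bool :=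
  if album == "" then false
  else scanB (PySem.Str.lower album).toList

-- ===== PRECONDITION & SPEC =====
def Spec_is_live_or_alternate_album (album : String) (out : Bool) : Prop := out = is_live_or_alternate_album_alt album
instance (album : String) (out : Bool) : Decidable (Spec_is_live_or_alternate_album album out) := by unfold Spec_is_live_or_alternate_album; infer_instance

-- ===== CLAIM (what is proved, stated in full; the proofs are below) =====
def Claim_equal_is_live_or_alternate_album : Prop := ∀ (album : String), Dom_is_live_or_alternate_album album → Spec_is_live_or_alternate_album album (is_live_or_alternate_album album)

-- ===== LEMMAS AND PROOFS =====

-- the scan is true iff some reduced keyword is an infix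
theorem scanB_iff (cs : List Char) :
    scanB cs = true ↔ ∃ kw ∈ liveKeywordsB, kw.toList <:+: cs := by
  induction cs with
  | nil =>
    simp only [scanB, Bool.false_eq_true, false_iff]
    rintro ⟨kw, hkw, hinf⟩
    have : kw.toList = [] := List.eq_nil_of_infix_nil hinf
    fin_cases hkw <;> simp_all
  | cons c rest ih =>
    simp only [scanB, Bool.or_eq_true, ih, startsAnyB, List.any_eq_true,
      List.isPrefixOf_iff_prefix]
    constructor
    · rintro (⟨kw, hkw, hpre⟩ | ⟨kw, hkw, hinf⟩)
      · exact ⟨kw, hkw, hpre.isInfix⟩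
      · exact ⟨kw, hkw, hinf.trans (List.infix_cons_iff.mpr (Or.inr List.infix_rfl))⟩
    · rintro ⟨kw, hkw, hinf⟩
      rcases List.infix_cons_iff.mp hinf with hpre | hinf'
      · exact Or.inl ⟨kw, hkw, hpre⟩
      · exact Or.inr ⟨kw, hkw, hinf'⟩

-- the 10-keyword infix test equals the reduced 5-keyword infix test
theorem tenIffFive (cs : List Char) :
    (∃ kw ∈ liveKeywordsA, kw.toList <:+: cs) ↔ ∃ kw ∈ liveKeywordsB, kw.toList <:+: cs := by
  constructor
  · rintro ⟨kw, hkw, hinf⟩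
    have sub : ∀ (k : String), k ∈ liveKeywordsB → k.toList <:+: kw.toList →
        ∃ kw' ∈ liveKeywordsB, kw'.toList <:+: cs := by
      intro k hk hpre
      exact ⟨k, hk, hpre.trans hinf⟩
    fin_cases hkw
    · exact sub "live" (by simp [liveKeywordsB]) (by decide)
    · exact sub "unplugged" (by simp [liveKeywordsB]) (by decide)
    · exact sub "acoustic" (by simp [liveKeywordsB]) (by decide)
    · exact sub "live" (by simp [liveKeywordsB]) (by decide)
    · exact sub "live" (by simp [liveKeywordsB]) (by decide)
    · exact sub "concert" (by simp [liveKeywordsB]) (by decide)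
    · exact sub "live" (by simp [liveKeywordsB]) (by decide)
    · exact sub "concert" (by simp [liveKeywordsB]) (by decide)
    · exact sub "on stage" (by simp [liveKeywordsB]) (by decide)
    · exact sub "live" (by simp [liveKeywordsB]) (by decide)
  · rintro ⟨kw, hkw, hinf⟩
    refine ⟨kw, ?_, hinf⟩
    fin_cases hkw <;> simp [liveKeywordsA]

-- ===== VERDICT (by name: the statement is the Claim_ definition above) =====
theorem is_live_or_alternate_album_spec : Claim_equal_is_live_or_alternate_album := by
  intro album _
  unfold Spec_is_live_or_alternate_album is_live_or_alternate_album is_live_or_alternate_album_alt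
  by_cases h : album = ""
  · simp [h]
  · simp only [beq_iff_eq, h, if_false]
    have hA : (liveKeywordsA.any fun kw => PySem.Str.isIn kw (PySem.Str.lower album)) = true ↔
        ∃ kw ∈ liveKeywordsA, kw.toList <:+: (PySem.Str.lower album).toList := by
      simp only [List.any_eq_true, PySem.Str.isIn_iff_infix]
    have : (liveKeywordsA.any fun kw => PySem.Str.isIn kw (PySem.Str.lower album))
        = scanB (PySem.Str.lower album).toList := by
      rw [Bool.eq_iff_iff, hA, scanB_iff, tenIffFive]
    exact this
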